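-- pv_equiv track=rewrite | github.com/jakehoare/leetcode | python_1001_to_2000/1046_Last_Stone_Weight.py | lastStoneWeight
-- ===== SOURCE A (Python) =====
-- import heapq
--
-- def lastStoneWeight(stones):
--     """
--     :type stones: List[int]
--     :rtype: int
--     """
--     stones = [-stone for stone in stones]           # negative so largest values are popped first
--     heapq.heapify(stones)
--
--     while len(stones) > 1:
--         new = heapq.heappop(stones) - heapq.heappop(stones)
--         if new != 0:
--             heapq.heappush(stones, new)
--
--     return -stones[0] if stones else 0
-- ===== SOURCE B (Python) =====
-- def lastStoneWeight(stones):
--     """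
--     :type stones: List[int]
--     :rtype: int
--     """
--     s = sorted(stones)                  # work on a sorted copy; input is not mutated
--     while len(s) > 1:
--         a = s.pop()                     # largest
--         b = s.pop()                     # second largest
--         d = a - b
--         if d != 0:
--             lo, hi = 0, len(s)          # binary search for d's insertion point
--             while lo < hi:
--                 mid = (lo + hi) // 2
--                 if s[mid] <= d:
--                     lo = mid + 1
--                 else:
--                     hi = mid
--             s.insert(lo, d)
--     return s[0] if s else 0
-- ===== Notes on version B (the rewrite author's own statement) =====
-- stated objective: simpler
-- what changed: Replaces the negated binary heap with a plain ascending sorted list: pop the two largest off the end and reinsert a nonzero difference at its binary-searched position, returning the single remaining element (or zero) with no sign juggling.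
import Mathlib
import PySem

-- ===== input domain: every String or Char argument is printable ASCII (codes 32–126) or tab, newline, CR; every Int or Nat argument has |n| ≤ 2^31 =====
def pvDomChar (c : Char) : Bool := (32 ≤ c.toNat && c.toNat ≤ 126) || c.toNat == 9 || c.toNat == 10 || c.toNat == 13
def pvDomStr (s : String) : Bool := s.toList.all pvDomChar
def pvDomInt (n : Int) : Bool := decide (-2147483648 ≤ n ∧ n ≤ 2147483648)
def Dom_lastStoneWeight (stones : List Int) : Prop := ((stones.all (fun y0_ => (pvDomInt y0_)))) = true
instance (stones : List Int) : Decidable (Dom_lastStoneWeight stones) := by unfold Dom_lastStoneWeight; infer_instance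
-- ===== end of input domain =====

-- B replaces A's negated min-heap by a maintained ascending sorted list (pop the two largest from the end, reinsert the difference at its binary-searched position): simpler smashing logic, no sign juggling.

-- ===== PORT A =====
-- heapq.heappop returns the minimum of the heap; ported as "extract the minimum value" (observationally exact for int heaps: duplicates are equal values).
def pvPopMin (h : List Int) : Int × List Int :=
  let m := (h.min?).getD 0
  (m, h.erase m)

theorem pvPopMin_length (h : List Int) (hne : h ≠ []) : (pvPopMin h).2.length + 1 = h.length := by
  have : ∃ m, h.min? = some m := by
    cases hh : h.min? with
    | none => exact absurd (List.min?_eq_none_iff.mp hh) hne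
    | some m => exact ⟨m, rfl⟩
  obtain ⟨m, hm⟩ := this
  have hmem : m ∈ h := List.min?_mem hm
  have := List.length_erase_of_mem hmem
  have hpos : 0 < h.length := List.length_pos_of_mem hmem
  simp only [pvPopMin, hm, Option.getD_some]
  omega

def heapLoop (h : List Int) : List Int :=
  if 1 < h.length then
    let p1 := pvPopMin h
    let p2 := pvPopMin p1.2
    let new := p1.1 - p2.1
    heapLoop (if new ≠ 0 then new :: p2.2 else p2.2)
  else h
termination_by h.length
decreasing_by
  have hne : h ≠ [] := by intro hnil; subst hnil; simp_all
  have h1 : (pvPopMin h).2.length + 1 = h.length := pvPopMin_length h hne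
  have h2 : (pvPopMin (pvPopMin h).2).2.length + 1 = (pvPopMin h).2.length :=
    pvPopMin_length _ (by intro hnil; rw [hnil] at h1; simp at h1; omega)
  split <;> simp <;> omega

def lastStoneWeight (stones : List Int) : Int :=
  let h := stones.map (fun stone => -stone)
  let h := heapLoop h
  match h with
  | x :: _ => -x
  | [] => 0

-- ===== PORT B =====
-- the hand-written binary search loop of Source B (lo, hi bounds; returns the insertion point)
def bisLoop (s : List Int) (d : Int) : Nat → Nat → Nat → Nat
  | 0, lo, _ => lo
  | fuel + 1, lo, hi =>
    if lo < hi then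
      if s.getD ((lo + hi) / 2) 0 ≤ d then bisLoop s d fuel ((lo + hi) / 2 + 1) hi
      else bisLoop s d fuel lo ((lo + hi) / 2)
    else lo

theorem bisLoop_le_aux (s : List Int) (d : Int) :
    ∀ (n lo hi : Nat), lo ≤ hi → bisLoop s d n lo hi ≤ hi := by
  intro n
  induction n with
  | zero => intro lo hi h2; simp [bisLoop]; omega
  | succ m ih =>
    intro lo hi h2
    rw [bisLoop]
    by_cases hlt : lo < hi
    · simp only [hlt, if_true]
      split
      · exact ih _ _ (by omega)
      · exact le_trans (ih _ _ (by omega)) (by omega)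
    · simp [hlt]; omega

theorem bisLoop_le (s : List Int) (d : Int) (n lo hi : Nat) (h : lo ≤ hi) :
    bisLoop s d n lo hi ≤ hi :=
  bisLoop_le_aux s d n lo hi h

-- s.insert(lo, d): exact for 0 ≤ lo ≤ len(s), which bisLoop guarantees
def binsert (s : List Int) (d : Int) : List Int :=
  let lo := bisLoop s d s.length 0 s.length
  s.take lo ++ d :: s.drop lo

theorem length_binsert (s : List Int) (d : Int) : (binsert s d).length = s.length + 1 := by
  have h := bisLoop_le s d s.length 0 s.length (by omega)
  simp [binsert]

def smashLoop (s : List Int) : List Int :=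
  if 1 < s.length then
    let a := (s.getLast?).getD 0
    let s1 := s.dropLast
    let b := (s1.getLast?).getD 0
    let s2 := s1.dropLast
    let d := a - b
    smashLoop (if d ≠ 0 then binsert s2 d else s2)
  else s
termination_by s.length
decreasing_by
  have h2 : s.dropLast.dropLast.length = s.length - 2 := by simp; omega
  split <;> simp only [length_binsert, h2] <;> omega

def lastStoneWeight_alt (stones : List Int) : Int :=
  let s := PySem.List.sorted stones (fun x => x) false
  let s := smashLoop s
  match s with
  | x :: _ => x
  | [] => 0

-- ===== PRECONDITION & SPEC =====
def Spec_lastStoneWeight (stones : List Int) (out : Int) : Prop := out = lastStoneWeight_alt stones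
instance (stones : List Int) (out : Int) : Decidable (Spec_lastStoneWeight stones out) := by unfold Spec_lastStoneWeight; infer_instance

-- ===== CLAIM (what is proved, stated in full; the proofs are below) =====
def Claim_equal_lastStoneWeight : Prop := ∀ (stones : List Int), Dom_lastStoneWeight stones → Spec_lastStoneWeight stones (lastStoneWeight stones)

-- ===== LEMMAS AND PROOFS =====

theorem bisLoop_spec_aux (s : List Int) (d : Int) (hs : s.Pairwise (· ≤ ·)) :
    ∀ (n lo hi : Nat), hi - lo ≤ n → lo ≤ hi → hi ≤ s.length →
    (∀ j, j < lo → s.getD j 0 ≤ d) →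
    (∀ j, hi ≤ j → j < s.length → d < s.getD j 0) →
    (∀ j, j < bisLoop s d n lo hi → s.getD j 0 ≤ d) ∧
    (∀ j, bisLoop s d n lo hi ≤ j → j < s.length → d < s.getD j 0) := by
  have hmono : ∀ (i j : Nat), i ≤ j → j < s.length → s.getD i 0 ≤ s.getD j 0 := by
    intro i j hij hj
    rcases Nat.eq_or_lt_of_le hij with rfl | hlt
    · omega
    · rw [List.getD_eq_getElem s 0 (by omega), List.getD_eq_getElem s 0 hj]
      exact List.pairwise_iff_getElem.mp hs i j (by omega) hj hlt
  intro n
  induction n with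
  | zero =>
    intro lo hi h1 h2 h3 pre1 pre2
    rw [bisLoop]
    exact ⟨fun j hj => pre1 j hj, fun j hj hjl => pre2 j (by omega) hjl⟩
  | succ m ih =>
    intro lo hi h1 h2 h3 pre1 pre2
    rw [bisLoop]
    by_cases hlt : lo < hi
    · simp only [hlt, if_true]
      split
      · rename_i hmid
        refine ih ((lo + hi) / 2 + 1) hi (by omega) (by omega) h3 ?_ pre2
        intro j hj
        by_cases hjlo : j < lo
        · exact pre1 j hjlo
        · exact le_trans (hmono j ((lo + hi) / 2) (by omega) (by omega)) hmid
      · rename_i hmid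
        refine ih lo ((lo + hi) / 2) (by omega) (by omega) (by omega) pre1 ?_
        intro j hj hjl
        exact lt_of_lt_of_le (by omega) (hmono ((lo + hi) / 2) j hj hjl)
    · simp only [hlt, if_false]
      exact ⟨fun j hj => pre1 j hj, fun j hj hjl => pre2 j (by omega) hjl⟩

theorem binsert_perm (s : List Int) (d : Int) : (binsert s d).Perm (d :: s) := by
  unfold binsert
  have := List.perm_middle (l₁ := s.take (bisLoop s d s.length 0 s.length))
      (l₂ := s.drop (bisLoop s d s.length 0 s.length)) (a := d)
  simpa using this

theorem binsert_pairwise (s : List Int) (d : Int) (hs : s.Pairwise (· ≤ ·)) :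
    (binsert s d).Pairwise (· ≤ ·) := by
  obtain ⟨hsp1, hsp2⟩ := bisLoop_spec_aux s d hs s.length 0 s.length le_rfl (by omega) le_rfl
      (by omega) (by omega)
  set p := bisLoop s d s.length 0 s.length with hp
  have hple : p ≤ s.length := bisLoop_le s d s.length 0 s.length (by omega)
  have htake : ∀ x ∈ s.take p, x ≤ d := by
    intro x hx
    rw [List.mem_take_iff_getElem] at hx
    obtain ⟨j, hj, rfl⟩ := hx
    have hjlen : j < s.length := by omega
    have := hsp1 j (by omega)
    rwa [List.getD_eq_getElem s 0 hjlen] at this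
  have hdrop : ∀ y ∈ s.drop p, d ≤ y := by
    intro y hy
    rw [List.mem_drop_iff_getElem] at hy
    obtain ⟨j, hj, rfl⟩ := hy
    have := hsp2 (p + j) (by omega) (by omega)
    rw [List.getD_eq_getElem s 0 (by omega)] at this
    omega
  unfold binsert
  rw [← hp, List.pairwise_append]
  refine ⟨hs.sublist (List.take_sublist _ _), ?_, ?_⟩
  · refine List.pairwise_cons.mpr ⟨hdrop, hs.sublist (List.drop_sublist _ _)⟩
  · intro x hx y hy
    rcases List.mem_cons.mp hy with rfl | hy
    · exact htake x hx
    · exact le_trans (htake x hx) (hdrop y hy)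

theorem erase_concat_perm (l : List Int) (x : Int) : ((l ++ [x]).erase x).Perm l := by
  by_cases hx : x ∈ l
  · have h1 : (l ++ [x]).Perm (x :: l) := by
      simp
    have h2 := h1.erase x
    simp [List.erase_cons_head] at h2
    exact h2
  · simp [List.erase_append_right _ hx, List.erase_cons_head]

theorem dropLast_concat_getLastD (l : List Int) (h : l ≠ []) :
    l.dropLast ++ [l.getLast?.getD 0] = l := by
  rw [List.getLast?_eq_some_getLast h]; simp [List.dropLast_append_getLast]

theorem pairwise_le_getLastD (s : List Int) (hs : s.Pairwise (· ≤ ·)) (hne : s ≠ [])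
    (x : Int) (hx : x ∈ s) : x ≤ s.getLast?.getD 0 := by
  have hsplit := dropLast_concat_getLastD s hne
  rw [← hsplit] at hs hx
  rcases List.mem_append.mp hx with h | h
  · exact (List.pairwise_append.mp hs).2.2 x h _ (by simp)
  · simp at h; omega

theorem heapLoop_eq_smashLoop : ∀ (n : Nat) (h s : List Int), h.length ≤ n →
    s.Pairwise (· ≤ ·) → h.Perm (s.map (fun x => -x)) →
    heapLoop h = (smashLoop s).map (fun x => -x) := by
  intro n
  induction n with
  | zero =>
    intro h s hlen _ hperm
    have hh : h = [] := List.length_eq_zero_iff.mp (by omega)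
    have hs : s = [] := by
      have hl := hperm.length_eq
      rw [hh] at hl
      simp only [List.length_nil, List.length_map] at hl
      exact List.length_eq_zero_iff.mp hl.symm
    subst hh; subst hs
    rw [heapLoop, smashLoop]; simp
  | succ m ih =>
    intro h s hlen hsort hperm
    have hlens : h.length = s.length := by
      have := hperm.length_eq; simp at this; exact this
    by_cases hgt : 1 < h.length
    · -- decompose s = s2 ++ [b, a]
      have hsne : s ≠ [] := by
        intro hnil; rw [hnil] at hlens
        simp only [List.length_nil] at hlens; omega
      set a := s.getLast?.getD 0 with ha
      set s1 := s.dropLast with hs1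
      have hs_eq : s1 ++ [a] = s := dropLast_concat_getLastD s hsne
      have hs1ne : s1 ≠ [] := by
        intro hnil
        rw [hnil] at hs_eq
        have : s.length = 1 := by rw [← hs_eq]; simp
        omega
      set b := s1.getLast?.getD 0 with hb
      set s2 := s1.dropLast with hs2
      have hs1_eq : s2 ++ [b] = s1 := dropLast_concat_getLastD s1 hs1ne
      -- sortedness facts
      have hba : b ≤ a := by
        refine pairwise_le_getLastD s hsort hsne b ?_
        rw [← hs_eq]; exact List.mem_append_left _ (by rw [← hs1_eq]; simp)
      have hs1sort : s1.Pairwise (· ≤ ·) := by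
        rw [← hs_eq] at hsort; exact (List.pairwise_append.mp hsort).1
      have hs2sort : s2.Pairwise (· ≤ ·) := by
        rw [← hs1_eq] at hs1sort; exact (List.pairwise_append.mp hs1sort).1
      have hle_a : ∀ x ∈ s, x ≤ a := fun x hx => pairwise_le_getLastD s hsort hsne x hx
      have hle_b : ∀ x ∈ s1, x ≤ b := fun x hx => pairwise_le_getLastD s1 hs1sort hs1ne x hx
      -- A side: first pop is -a
      have hmin1 : h.min? = some (-a) := by
        rw [List.min?_eq_some_iff_subtype]
        constructor
        · refine hperm.mem_iff.mpr ?_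
          refine List.mem_map.mpr ⟨a, ?_, rfl⟩
          rw [← hs_eq]; simp
        · intro y hy
          rcases List.mem_map.mp (hperm.mem_iff.mp hy) with ⟨x, hx, rfl⟩
          have := hle_a x hx; omega
      have hp1 : pvPopMin h = (-a, h.erase (-a)) := by simp [pvPopMin, hmin1]
      have hh1perm : (h.erase (-a)).Perm (s1.map (fun x => -x)) := by
        have e1 := hperm.erase (-a)
        have : ((s.map (fun x => -x)).erase (-a)).Perm (s1.map (fun x => -x)) := by
          rw [← hs_eq]
          simp only [List.map_append, List.map_cons, List.map_nil]
          exact erase_concat_perm _ _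
        exact e1.trans this
      -- A side: second pop is -b
      have hmin2 : (h.erase (-a)).min? = some (-b) := by
        rw [List.min?_eq_some_iff_subtype]
        constructor
        · refine hh1perm.mem_iff.mpr ?_
          refine List.mem_map.mpr ⟨b, ?_, rfl⟩
          rw [← hs1_eq]; simp
        · intro y hy
          rcases List.mem_map.mp (hh1perm.mem_iff.mp hy) with ⟨x, hx, rfl⟩
          have := hle_b x hx; omega
      have hp2 : pvPopMin (h.erase (-a)) = (-b, (h.erase (-a)).erase (-b)) := by
        simp [pvPopMin, hmin2]
      have hh2perm : ((h.erase (-a)).erase (-b)).Perm (s2.map (fun x => -x)) := by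
        have e1 := hh1perm.erase (-b)
        have : ((s1.map (fun x => -x)).erase (-b)).Perm (s2.map (fun x => -x)) := by
          rw [← hs1_eq]
          simp only [List.map_append, List.map_cons, List.map_nil]
          exact erase_concat_perm _ _
        exact e1.trans this
      -- lengths
      have hlh1 : (h.erase (-a)).length + 1 = h.length := by
        have : -a ∈ h := by
          refine hperm.mem_iff.mpr (List.mem_map.mpr ⟨a, ?_, rfl⟩)
          rw [← hs_eq]; simp
        rw [List.length_erase_of_mem this]
        have := List.length_pos_of_mem this; omega
      have hlh2 : ((h.erase (-a)).erase (-b)).length + 1 = (h.erase (-a)).length := by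
        have hmem : -b ∈ h.erase (-a) := by
          refine hh1perm.mem_iff.mpr (List.mem_map.mpr ⟨b, ?_, rfl⟩)
          rw [← hs1_eq]; simp
        rw [List.length_erase_of_mem hmem]
        have := List.length_pos_of_mem hmem; omega
      -- unfold one step of each loop
      have hgt_s : 1 < s.length := by omega
      rw [heapLoop]
      rw [smashLoop]
      simp only [hgt, if_true, hgt_s, if_true, hp1, hp2]
      rw [← ha, ← hs1, ← hb, ← hs2]
      have harith : (-a : Int) - (-b) = -(a - b) := by ring
      by_cases hd : a - b = 0
      · have hnew0 : (-a : Int) - (-b) = 0 := by omega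
        simp only [hnew0, hd, ne_eq, not_true_eq_false, if_neg, not_false_eq_true]
        exact ih _ _ (by omega) hs2sort hh2perm
      · have hnew0 : (-a : Int) - (-b) ≠ 0 := by omega
        simp only [hnew0, hd, ne_eq, not_false_eq_true, if_true]
        have hnext_perm : ((-a - -b) :: (h.erase (-a)).erase (-b)).Perm
            ((binsert s2 (a - b)).map (fun x => -x)) := by
          have h1 : ((-a - -b) :: (h.erase (-a)).erase (-b)).Perm
              ((-(a-b)) :: s2.map (fun x => -x)) := by
            rw [harith]; exact hh2perm.cons _
          have h2 : ((binsert s2 (a - b)).map (fun x => -x)).Perm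
              ((-(a-b)) :: s2.map (fun x => -x)) := by
            have := (binsert_perm s2 (a - b)).map (fun x => -x)
            simpa using this
          exact h1.trans h2.symm
        refine ih _ _ ?_ (binsert_pairwise s2 (a - b) hs2sort) hnext_perm
        simp only [List.length_cons]
        omega
    · -- loops exit immediately
      rw [heapLoop, smashLoop]
      simp only [hgt, if_false]
      have hgt_s : ¬ 1 < s.length := by omega
      simp only [hgt_s, if_false]
      -- perm of lists of length ≤ 1 is equality
      match hh : h, hs : s with
      | [], [] => simp
      | [x], [y] =>
        subst hh hs
        have hx := hperm.mem_iff (a := x)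
        simp at hx ⊢
        omega
      | [], y :: ys => subst hh hs; simp at hlens
      | x :: xs, [] => subst hh hs; simp at hlens
      | x :: x' :: xs, s => subst hh; simp at hgt
      | [x], y :: y' :: ys => subst hh hs; simp at hlens

-- ===== VERDICT (by name: the statement is the Claim_ definition above) =====
theorem lastStoneWeight_spec : Claim_equal_lastStoneWeight := by
  unfold Claim_equal_lastStoneWeight Spec_lastStoneWeight
  intro stones _
  unfold lastStoneWeight lastStoneWeight_alt
  have hsort : (PySem.List.sorted stones (fun x => x) false).Pairwise (· ≤ ·) := by
    have := PySem.List.sorted_pairwise (xs := stones) (key := fun x => x)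
    simpa using this
  have hperm : (stones.map (fun stone => -stone)).Perm
      ((PySem.List.sorted stones (fun x => x) false).map (fun x => -x)) := by
    exact ((PySem.List.sorted_perm (xs := stones) (key := fun x => x) (rev := false)).map _).symm
  have hmain := heapLoop_eq_smashLoop (stones.map (fun stone => -stone)).length
      (stones.map (fun stone => -stone)) (PySem.List.sorted stones (fun x => x) false)
      le_rfl hsort hperm
  simp only [hmain]
  cases smashLoop (PySem.List.sorted stones (fun x => x) false) with
  | nil => simp
  | cons x xs => simp
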